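-- pv_equiv track=rewrite | github.com/yoana91/Programming0-Solutions | Week 7/sands_of_time.py | sands_of_time
-- ===== SOURCE A (Python) =====
-- def sands_of_time(odd_number):
--     counter = odd_number
--
--     sands = []
--
--     while counter >= 1:
--         sands += ["*" * counter]
--
--         counter -= 2
--
--     result = ""
--     counter = 1
--
--     for i in range(0, len(sands)):
--         result += "." * counter + sands[i] + "." * counter
--
--         result += "\n"
--         counter += 1
--
--     index = len(sands) - 2
--
--     while index >= 0:
--         result += "." * (index + 1) + sands[index] + "." * (index + 1) + "\n"
--
--         index -= 1
--
--     return result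
-- ===== SOURCE B (Python) =====
-- def sands_of_time(odd_number):
--     m = (odd_number + 1) // 2 if odd_number > 0 else 0
--     total = 2 * m - 1
--     rows = []
--     for r in range(total):
--         j = min(r, total - 1 - r)
--         rows.append("." * (j + 1) + "*" * (odd_number - 2 * j) + "." * (j + 1) + "\n")
--     return "".join(rows)
-- ===== Notes on version B (the rewrite author's own statement) =====
-- stated objective: simpler
-- what changed: Replaces A's three phases (a while-loop building a list of star strings, a forward for-loop over it, and a second backward while-loop for the mirror) by a closed-form row count m=(n+1)//2 and a single pass over all 2*m-1 rows that computes each row's dot depth arithmetically as min(r, total-1-r).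
import Mathlib
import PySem

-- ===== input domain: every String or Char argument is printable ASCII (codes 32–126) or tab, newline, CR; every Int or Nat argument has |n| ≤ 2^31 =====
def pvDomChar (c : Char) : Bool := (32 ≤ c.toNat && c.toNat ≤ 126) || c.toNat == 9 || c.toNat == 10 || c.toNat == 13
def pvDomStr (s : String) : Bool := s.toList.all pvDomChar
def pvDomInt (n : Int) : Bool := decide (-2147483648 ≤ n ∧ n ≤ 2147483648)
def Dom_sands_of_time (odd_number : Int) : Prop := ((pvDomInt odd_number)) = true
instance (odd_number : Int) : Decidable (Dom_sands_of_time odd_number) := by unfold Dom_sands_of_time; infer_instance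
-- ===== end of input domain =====

-- B replaces A's three loops (build star list, forward pass, backward mirror pass) by one
-- arithmetic pass over all 2*m-1 rows with dot depth min(r, total-1-r); objective: simpler.

-- ===== PORT A =====
-- "c" * n in Python: empty for n ≤ 0
def pvRep (ch : Char) (n : Int) : List Char := List.replicate n.toNat ch

-- the while-loop building sands (appends "*"*counter, counter -= 2)
def pvSandsA (counter : Int) : List (List Char) :=
  if counter ≥ 1 then pvRep '*' counter :: pvSandsA (counter - 2) else []
termination_by counter.toNat
decreasing_by simp_wf; omega

-- the second while-loop (index from len(sands)-2 down to 0)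
def pvDownA (sands : List (List Char)) (index : Int) (result : List Char) : List Char :=
  if index ≥ 0 then
    pvDownA sands (index - 1)
      (result ++ pvRep '.' (index + 1) ++ PySem.List.pyGetD sands index [] ++ pvRep '.' (index + 1) ++ ['\n'])
  else result
termination_by (index + 1).toNat
decreasing_by simp_wf; omega

def sands_of_time (odd_number : Int) : String :=
  let sands := pvSandsA odd_number
  let st := (PySem.List.pyRange 0 sands.length 1).foldl
    (fun (st : List Char × Int) i =>
      (st.1 ++ pvRep '.' st.2 ++ PySem.List.pyGetD sands i [] ++ pvRep '.' st.2 ++ ['\n'], st.2 + 1))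
    ([], 1)
  String.mk (pvDownA sands ((sands.length : Int) - 2) st.1)

-- ===== PORT B =====
def sands_of_time_alt (odd_number : Int) : String :=
  let m : Int := if odd_number > 0 then PySem.Int.floordiv (odd_number + 1) 2 else 0
  let total : Int := 2 * m - 1
  let rows := (PySem.List.pyRange 0 total 1).foldl
    (fun (acc : List (List Char)) r =>
      let j := min r (total - 1 - r)
      acc ++ [pvRep '.' (j + 1) ++ pvRep '*' (odd_number - 2 * j) ++ pvRep '.' (j + 1) ++ ['\n']])
    []
  String.mk (PySem.Chars.join [] rows)

-- ===== PRECONDITION & SPEC =====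
def Spec_sands_of_time (odd_number : Int) (out : String) : Prop := out = sands_of_time_alt odd_number
instance (odd_number : Int) (out : String) : Decidable (Spec_sands_of_time odd_number out) := by unfold Spec_sands_of_time; infer_instance

-- ===== CLAIM (what is proved, stated in full; the proofs are below) =====
def Claim_equal_sands_of_time : Prop := ∀ (odd_number : Int), Dom_sands_of_time odd_number → Spec_sands_of_time odd_number (sands_of_time odd_number)

-- ===== LEMMAS AND PROOFS =====

-- one hourglass row at dot depth j
def rowC (n j : Int) : List Char :=
  pvRep '.' (j + 1) ++ pvRep '*' (n - 2 * j) ++ pvRep '.' (j + 1) ++ ['\n']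

-- a row of A's loops, reading the stars from the sands list
def rowOf (s : List (List Char)) (i : Nat) : List Char :=
  pvRep '.' ((i : Int) + 1) ++ s.getD i [] ++ pvRep '.' ((i : Int) + 1) ++ ['\n']

theorem sandsA_eq (c : Int) :
    pvSandsA c = (List.range (pvSandsA c).length).map (fun (i : Nat) => pvRep '*' (c - 2 * (i : Int))) := by
  induction c using pvSandsA.induct with
  | case1 c h ih =>
      have hl : (pvSandsA c).length = (pvSandsA (c - 2)).length + 1 := by
        rw [pvSandsA, if_pos h]; rfl
      conv_lhs => rw [pvSandsA, if_pos h]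
      rw [hl, List.range_succ_eq_map, List.map_cons]
      congr 1
      · norm_num
      · rw [List.map_map, ih]
        simp only [List.length_map, List.length_range]
        apply List.map_congr_left
        intro i _
        simp only [Function.comp]
        congr 1
        push_cast
        ring
  | case2 c h =>
      rw [pvSandsA, if_neg h]
      simp

theorem lenSandsA (c : Int) (hc : 1 ≤ c) :
    ((pvSandsA c).length : Int) = PySem.Int.floordiv (c + 1) 2 := by
  induction c using pvSandsA.induct with
  | case1 c h ih =>
      rw [pvSandsA, if_pos h]
      by_cases h2 : 1 ≤ c - 2
      · have hih := ih h2
        have hb : (0:Int) < 2 := by norm_num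
        have h1 := (PySem.Int.le_floordiv_iff_mul_le (a := c - 2 + 1) (b := 2) hb (q := PySem.Int.floordiv (c - 2 + 1) 2)).mp le_rfl
        have h2' := (PySem.Int.floordiv_lt_iff_lt_mul (a := c - 2 + 1) (b := 2) hb (q := PySem.Int.floordiv (c - 2 + 1) 2 + 1)).mp (lt_add_one _)
        have h3 := (PySem.Int.le_floordiv_iff_mul_le (a := c + 1) (b := 2) hb (q := PySem.Int.floordiv (c + 1) 2)).mp le_rfl
        have h4 := (PySem.Int.floordiv_lt_iff_lt_mul (a := c + 1) (b := 2) hb (q := PySem.Int.floordiv (c + 1) 2 + 1)).mp (lt_add_one _)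
        simp only [List.length_cons]
        push_cast
        omega
      · rw [pvSandsA, if_neg h2]
        have hb : (0:Int) < 2 := by norm_num
        have h3 := (PySem.Int.le_floordiv_iff_mul_le (a := c + 1) (b := 2) hb (q := PySem.Int.floordiv (c + 1) 2)).mp le_rfl
        have h4 := (PySem.Int.floordiv_lt_iff_lt_mul (a := c + 1) (b := 2) hb (q := PySem.Int.floordiv (c + 1) 2 + 1)).mp (lt_add_one _)
        simp only [List.length_cons, List.length_nil]
        omega
  | case2 c h => omega

theorem loopA1 (s : List (List Char)) (k : Nat) :
    ∀ (a : Nat) (res : List Char), a + k = s.length →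
      (PySem.List.pyRange (a : Int) (s.length : Int) 1).foldl
        (fun (st : List Char × Int) i =>
          (st.1 ++ pvRep '.' st.2 ++ PySem.List.pyGetD s i [] ++ pvRep '.' st.2 ++ ['\n'], st.2 + 1))
        (res, (a : Int) + 1)
      = (res ++ ((List.range k).map (fun t => rowOf s (a + t))).flatten, (s.length : Int) + 1) := by
  induction k with
  | zero =>
      intro a res ha
      have : (a : Int) = (s.length : Int) := by omega
      rw [this, PySem.List.pyRange_one_eq_nil le_rfl]
      simp
  | succ k ih =>
      intro a res ha
      have hlt : (a : Int) < (s.length : Int) := by omega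
      rw [PySem.List.pyRange_one_cons hlt]
      simp only [List.foldl_cons]
      have hget : PySem.List.pyGetD s (a : Int) [] = s.getD a [] := by
        rw [PySem.List.pyGetD_natCast]
      rw [hget]
      have hstep : ((a : Int) + 1) + 1 = ((a + 1 : Nat) : Int) + 1 := by push_cast; ring
      have harg : (a : Int) + 1 = ((a + 1 : Nat) : Int) := by push_cast; ring
      rw [hstep, harg, ih (a + 1) _ (by omega)]
      simp only [Prod.mk.injEq, and_true]
      rw [List.range_succ_eq_map, List.map_cons, List.flatten_cons, List.map_map]
      have hmap : List.map (fun t => rowOf s (a + 1 + t)) (List.range k)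
          = List.map ((fun t => rowOf s (a + t)) ∘ Nat.succ) (List.range k) := by
        apply List.map_congr_left
        intro t _
        simp only [Function.comp]
        congr 1
        omega
      rw [hmap]
      simp [rowOf, List.append_assoc, show ((a + 1 : Nat) : Int) = (a : Int) + 1 from by push_cast; ring]

theorem loopA2 (s : List (List Char)) (k : Nat) :
    ∀ (res : List Char),
      pvDownA s ((k : Int) - 1) res = res ++ (((List.range k).map (rowOf s)).reverse).flatten := by
  induction k with
  | zero =>
      intro res
      rw [pvDownA, if_neg (by omega)]
      simp
  | succ k ih =>
      intro res
      rw [pvDownA, if_pos (by push_cast; omega)]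
      have h3 : (((k + 1 : Nat) : Int) - 1) = (k : Int) := by push_cast; ring
      rw [h3]
      have hget : PySem.List.pyGetD s (k : Int) [] = s.getD k [] := by
        rw [PySem.List.pyGetD_natCast]
      rw [hget, ih]
      rw [List.range_succ, List.map_append, List.reverse_append]
      simp [rowOf]

theorem foldAppendSingleton {α β : Type} (g : α → β) (l : List α) :
    ∀ (acc : List β), l.foldl (fun acc r => acc ++ [g r]) acc = acc ++ l.map g := by
  induction l with
  | nil => intro acc; simp
  | cons x xs ih => intro acc; simp [ih]

theorem joinNil (l : List (List Char)) : PySem.Chars.join [] l = l.flatten := by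
  induction l with
  | nil => rw [PySem.Chars.join_nil]; rfl
  | cons x xs ih =>
      cases xs with
      | nil => rw [PySem.Chars.join_singleton]; simp
      | cons y ys => rw [PySem.Chars.join_cons_cons, ih]; simp

theorem minSplit (f : Int → List Char) (m : Nat) (hm : 1 ≤ m) :
    (PySem.List.pyRange 0 (2 * (m : Int) - 1) 1).map (fun r => f (min r (2 * (m : Int) - 1 - 1 - r)))
    = (List.range m).map (fun (i : Nat) => f (i : Int)) ++ ((List.range (m - 1)).map (fun (i : Nat) => f (i : Int))).reverse := by
  have hcast : (2 * (m : Int) - 1) = ((2 * m - 1 : Nat) : Int) := by omega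
  rw [hcast, PySem.List.pyRange_zero_natCast, List.map_map]
  apply List.ext_getElem
  · simp; omega
  · intro i h1 h2
    simp only [List.getElem_map, List.getElem_range, Function.comp]
    simp only [List.length_map, List.length_range] at h1
    by_cases hi : i < m
    · rw [List.getElem_append_left (by simp [hi])]
      simp only [List.getElem_map, List.getElem_range]
      congr 1
      omega
    · rw [List.getElem_append_right (by simp; omega)]
      rw [List.getElem_reverse]
      simp only [List.getElem_map, List.getElem_range, List.length_map, List.length_range]
      congr 1
      omega

-- ===== VERDICT (by name: the statement is the Claim_ definition above) =====
theorem sands_of_time_spec : Claim_equal_sands_of_time := by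
  intro n _
  unfold Spec_sands_of_time
  simp only [sands_of_time, sands_of_time_alt]
  by_cases hn : 1 ≤ n
  · -- n ≥ 1: both sides are the m top rows followed by the m-1 mirror rows
    set s := pvSandsA n with hs
    set m := s.length with hm
    have hm1 : 1 ≤ m := by
      rw [hm, hs, pvSandsA, if_pos hn]; simp
    have hmf : (m : Int) = PySem.Int.floordiv (n + 1) 2 := lenSandsA n hn
    have hrow : ∀ i : Nat, i < m → rowOf s i = rowC n (i : Int) := by
      intro i hi
      unfold rowOf rowC
      congr 2
      rw [hs, sandsA_eq n, ← hs, ← hm]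
      rw [List.getD_eq_getElem?_getD, List.getElem?_map, List.getElem?_range hi]
      simp
    -- A side
    have hA1 := loopA1 s m 0 [] (by omega)
    simp only [Nat.cast_zero, zero_add] at hA1
    have hidx : (m : Int) - 2 = ((m - 1 : Nat) : Int) - 1 := by omega
    rw [hA1, hidx, loopA2 s (m - 1)]
    -- B side
    rw [if_pos (by omega : (0:Int) < n), ← hmf]
    rw [foldAppendSingleton]
    rw [joinNil]
    have hminf := minSplit (fun j => rowC n j) m hm1
    simp only [rowC] at hminf hrow
    rw [hminf]
    dsimp only
    simp only [List.nil_append, List.flatten_append]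
    congr 1
    congr 1
    · apply congrArg
      apply List.map_congr_left
      intro t ht
      rw [List.mem_range] at ht
      exact hrow t ht
    · apply congrArg
      apply congrArg
      apply List.map_congr_left
      intro t ht
      rw [List.mem_range] at ht
      exact hrow t (by omega)
  · -- n ≤ 0: both sides are the empty string
    have hsands : pvSandsA n = [] := by rw [pvSandsA, if_neg hn]
    rw [hsands]
    simp only [List.length_nil, Nat.cast_zero]
    rw [PySem.List.pyRange_one_eq_nil le_rfl]
    simp only [List.foldl_nil]
    rw [pvDownA, if_neg (by omega)]
    rw [if_neg (by omega)]
    rw [PySem.List.pyRange_one_eq_nil (by norm_num)]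
    simp only [List.foldl_nil]
    rw [PySem.Chars.join_nil]
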